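-- pv_equiv track=rewrite | github.com/InDevRus/polynomials | parsing.py | check_monomial
-- ===== SOURCE A (Python) =====
-- def check_sum(string: str) -> bool:
--     """
--     Checks if the string has + or - operators
--     outside of the brackets.
--     """
--     bracketBalance = 0
--     for index in range(len(string)):
--         symbol = string[index]
--         if symbol == '(':
--             bracketBalance += 1
--         elif symbol == ')':
--             bracketBalance -= 1
--         elif symbol in '+-' and bracketBalance == 0 and index > 0:
--             return True
--     return False
--
-- def check_monomial(string: str) -> bool:
--     """
--     Checks if the expression is monomial, where
--     monomial is the mathematical expression that
--     does not contain variables and "+", "-"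
--     outside of the brackets.
--     Possible exception: "+" or '-' at the beginning.
--     """
--     bracketBalance = 0
--     for symbol in string:
--         if symbol == '(':
--             bracketBalance += 1
--         elif symbol == ')':
--             bracketBalance -= 1
--         elif symbol.isalpha() and symbol != 'j' and bracketBalance > 0:
--             return False
--     return not check_sum(string)
-- ===== SOURCE B (Python) =====
-- def check_monomial(string: str) -> bool:
--     bracketBalance = 0
--     for index, symbol in enumerate(string):
--         if symbol == '(':
--             bracketBalance += 1
--         elif symbol == ')':
--             bracketBalance -= 1
--         elif symbol.isalpha() and symbol != 'j' and bracketBalance > 0: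
--             return False
--         elif symbol in '+-' and bracketBalance == 0 and index > 0:
--             return False
--     return True
-- ===== Notes on version B (the rewrite author's own statement) =====
-- stated objective: simpler
-- what changed: Fuses A's two scans (main loop plus the check_sum helper, each walking the string with its own bracket balance) into one helper-free enumerate pass tracking a single balance.
import Mathlib
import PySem

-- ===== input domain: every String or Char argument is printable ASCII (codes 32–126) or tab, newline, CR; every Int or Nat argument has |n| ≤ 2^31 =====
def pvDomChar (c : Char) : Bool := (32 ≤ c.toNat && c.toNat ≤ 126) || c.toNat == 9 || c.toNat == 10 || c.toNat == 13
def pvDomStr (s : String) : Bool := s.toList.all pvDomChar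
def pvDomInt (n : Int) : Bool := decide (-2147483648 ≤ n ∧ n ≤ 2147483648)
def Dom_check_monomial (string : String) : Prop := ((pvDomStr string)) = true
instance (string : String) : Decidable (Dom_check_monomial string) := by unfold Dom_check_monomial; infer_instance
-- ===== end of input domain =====

-- B fuses A's main loop and its check_sum helper into one helper-free pass (objective: simpler).

-- ===== PORT A =====
-- check_sum's for-index loop: recursion over the chars with the running index and bracket balance
def checkSumLoop : List Char → Int → Int → Bool
  | [], _, _ => false
  | c :: cs, index, bal =>
    if c = '(' then checkSumLoop cs (index + 1) (bal + 1)
    else if c = ')' then checkSumLoop cs (index + 1) (bal - 1)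
    else if (c = '+' ∨ c = '-') ∧ bal = 0 ∧ index > 0 then true
    else checkSumLoop cs (index + 1) bal

def check_sum (string : String) : Bool := checkSumLoop string.toList 0 0

-- check_monomial's main for loop: returns false on an early `return False`, true if it falls through
def checkMonoLoop : List Char → Int → Bool
  | [], _ => true
  | c :: cs, bal =>
    if c = '(' then checkMonoLoop cs (bal + 1)
    else if c = ')' then checkMonoLoop cs (bal - 1)
    else if PySem.Chars.isalpha c ∧ c ≠ 'j' ∧ bal > 0 then false
    else checkMonoLoop cs bal

def check_monomial (string : String) : Bool :=
  if checkMonoLoop string.toList 0 then ! check_sum string else false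

-- ===== PORT B =====
-- the single fused enumerate pass
def fusedLoop : List Char → Int → Int → Bool
  | [], _, _ => true
  | c :: cs, index, bal =>
    if c = '(' then fusedLoop cs (index + 1) (bal + 1)
    else if c = ')' then fusedLoop cs (index + 1) (bal - 1)
    else if PySem.Chars.isalpha c ∧ c ≠ 'j' ∧ bal > 0 then false
    else if (c = '+' ∨ c = '-') ∧ bal = 0 ∧ index > 0 then false
    else fusedLoop cs (index + 1) bal

def check_monomial_alt (string : String) : Bool := fusedLoop string.toList 0 0

-- ===== PRECONDITION & SPEC =====
def Spec_check_monomial (string : String) (out : Bool) : Prop := out = check_monomial_alt string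
instance (string : String) (out : Bool) : Decidable (Spec_check_monomial string out) := by unfold Spec_check_monomial; infer_instance

-- ===== CLAIM (what is proved, stated in full; the proofs are below) =====
def Claim_equal_check_monomial : Prop := ∀ (string : String), Dom_check_monomial string → Spec_check_monomial string (check_monomial string)

-- ===== LEMMAS AND PROOFS =====
theorem fusedLoop_eq (cs : List Char) (index bal : Int) :
    fusedLoop cs index bal = (checkMonoLoop cs bal && ! checkSumLoop cs index bal) := by
  induction cs generalizing index bal with
  | nil => rfl
  | cons c cs ih =>
    simp only [fusedLoop, checkMonoLoop, checkSumLoop]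
    by_cases h1 : c = '('
    · simp [h1, ih]
    · by_cases h2 : c = ')'
      · simp [h2, ih]
      · by_cases h3 : PySem.Chars.isalpha c ∧ c ≠ 'j' ∧ bal > 0
        · have hp : ¬ (c = '+' ∨ c = '-') := by
            rintro (rfl | rfl) <;> exact absurd h3.1 (by decide)
          simp [h1, h2, h3, hp]
        · by_cases h4 : (c = '+' ∨ c = '-') ∧ bal = 0 ∧ index > 0
          · simp [h1, h2, h4]
          · simp [h1, h2, h3, h4, ih]

-- ===== VERDICT (by name: the statement is the Claim_ definition above) =====
theorem check_monomial_spec : Claim_equal_check_monomial := by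
  intro s _
  unfold Spec_check_monomial check_monomial check_monomial_alt check_sum
  rw [fusedLoop_eq]
  cases checkMonoLoop s.toList 0 <;> simp
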